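-- pv_equiv track=rewrite | github.com/k85-ai/KB1 | confidence_refine.py | pta_accepts
-- ===== SOURCE A (Python) =====
-- def pta_accepts(seq, pos_traces):
--     """
--     Check whether a sequence is accepted by the PTA built from the current positive traces.
--     """
--     trie = {}
--     END = "__end__"
--
--     for tr in pos_traces:
--         node = trie
--         for a in tr:
--             node = node.setdefault(a, {})
--         node[END] = True
--
--     node = trie
--     for a in seq:
--         if a not in node:
--             return False
--         node = node[a]
--     return True
-- ===== SOURCE B (Python) =====
-- def pta_accepts(seq, pos_traces):
--     # A sequence is accepted iff it is empty (the trie root always exists)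
--     # or it is a prefix of some positive trace.
--     return not seq or any(tr[:len(seq)] == seq for tr in pos_traces)
-- ===== Notes on version B (the rewrite author's own statement) =====
-- stated objective: simpler
-- what changed: Replaced the trie construction (nested dicts with an __end__ sentinel) and trie walk by a direct one-pass prefix test: seq is accepted iff it is empty or equals the length-len(seq) prefix of some positive trace.
-- outside the precondition, e.g. on pta_accepts(['__end__'], [[]]): A returns True, B returns False; on pta_accepts(['x', '__end__', 'y'], [['x']]): A raises TypeError, B returns False; on pta_accepts([], [[], ['__end__', 'a']]): A raises AttributeError, B returns True
import Mathlib
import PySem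

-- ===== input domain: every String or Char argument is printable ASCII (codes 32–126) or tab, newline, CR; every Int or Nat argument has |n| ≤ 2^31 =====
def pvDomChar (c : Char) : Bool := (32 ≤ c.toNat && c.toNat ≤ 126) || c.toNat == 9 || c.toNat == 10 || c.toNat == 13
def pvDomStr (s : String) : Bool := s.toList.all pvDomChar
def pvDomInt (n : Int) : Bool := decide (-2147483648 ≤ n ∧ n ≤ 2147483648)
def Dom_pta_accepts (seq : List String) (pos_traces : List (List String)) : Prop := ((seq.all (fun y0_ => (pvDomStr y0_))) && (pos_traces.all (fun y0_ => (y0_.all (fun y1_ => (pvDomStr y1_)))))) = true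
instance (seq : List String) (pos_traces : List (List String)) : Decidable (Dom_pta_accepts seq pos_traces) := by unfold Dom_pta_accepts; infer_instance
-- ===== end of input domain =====

-- ===== PORT A =====
-- B drops A's trie entirely: one pass comparing each trace's prefix to seq (objective: simpler).
-- A's trie of nested dicts is ported as an inductive assoc-list trie; Python's `node[END] = True`
-- stores the sentinel key "__end__" (value modeled as an empty node: under Pre_ no input symbol
-- equals "__end__", so that value is never read).
inductive Trie where
  | nil : Trie
  | cons : String → Trie → Trie → Trie
deriving DecidableEq, Repr

-- dict lookup: first (unique) matching key
def trieGet? : Trie → String → Option Trie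
  | .nil, _ => none
  | .cons k v rest, a => if k = a then some v else trieGet? rest a

-- node[END] = True : overwrite if present, else append at the end (dict semantics)
def setEnd : Trie → Trie
  | .nil => .cons "__end__" .nil .nil
  | .cons k v rest => if k = "__end__" then .cons k .nil rest else .cons k v (setEnd rest)

-- the inner `for a in tr: node = node.setdefault(a, {})` followed by `node[END] = True`,
-- with setdefault's in-place nested mutation rendered as path-copying
def insertTrace : Trie → List String → Trie
  | t, [] => setEnd t
  | .nil, a :: tr => .cons a (insertTrace .nil tr) .nil
  | .cons k v rest, a :: tr =>
      if k = a then .cons k (insertTrace v tr) rest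
      else .cons k v (insertTrace rest (a :: tr))
  termination_by t l => (l.length, sizeOf t)

-- the final walk: `for a in seq: if a not in node: return False; node = node[a]`
def trieWalk : Trie → List String → Bool
  | _, [] => true
  | t, a :: s =>
      match trieGet? t a with
      | none => false
      | some n => trieWalk n s

def pta_accepts (seq : List String) (pos_traces : List (List String)) : Bool :=
  trieWalk (pos_traces.foldl insertTrace .nil) seq

-- ===== PORT B =====
def pta_accepts_alt (seq : List String) (pos_traces : List (List String)) : Bool :=
  seq.isEmpty || pos_traces.any (fun tr => tr.take seq.length == seq)

-- ===== PRECONDITION & SPEC =====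
-- Pre_ excludes (a) sequences containing A's reserved internal sentinel "__end__", on which A's
-- walk either raises TypeError or returns sentinel-driven artefact values, and (b) trace lists
-- whose insertion walks a symbol "__end__" out of a node already marked by a completed earlier
-- trace, on which A raises AttributeError/TypeError; B does the natural prefix test there.
def Pre_pta_accepts (seq : List String) (pos_traces : List (List String)) : Prop :=
  "__end__" ∉ seq ∧
  (pos_traces.zipIdx.all (fun p =>
    (List.range p.1.length).all (fun j =>
      !(p.1.getD j "" == "__end__") || !(pos_traces.take p.2).contains (p.1.take j)))) = true
instance (seq : List String) (pos_traces : List (List String)) : Decidable (Pre_pta_accepts seq pos_traces) := by unfold Pre_pta_accepts; infer_instance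

def pvWitness_pta_accepts : List String × List (List String) :=
  (["a", "b"], [["a", "b", "c"], ["x"]])

def Spec_pta_accepts (seq : List String) (pos_traces : List (List String)) (out : Bool) : Prop := out = pta_accepts_alt seq pos_traces
instance (seq : List String) (pos_traces : List (List String)) (out : Bool) : Decidable (Spec_pta_accepts seq pos_traces out) := by unfold Spec_pta_accepts; infer_instance

-- ===== CLAIM (what is proved, stated in full; the proofs are below) =====
def Claim_equal_pta_accepts : Prop := ∀ (seq : List String) (pos_traces : List (List String)), Dom_pta_accepts seq pos_traces → Pre_pta_accepts seq pos_traces → Spec_pta_accepts seq pos_traces (pta_accepts seq pos_traces)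

-- ===== LEMMAS AND PROOFS =====
theorem trieGet?_cons_self (k : String) (v rest : Trie) :
    trieGet? (.cons k v rest) k = some v := by simp [trieGet?]

theorem trieGet?_cons_ne (k a : String) (v rest : Trie) (h : k ≠ a) :
    trieGet? (.cons k v rest) a = trieGet? rest a := by simp [trieGet?, h]

theorem trieWalk_cons (t : Trie) (a : String) (s : List String) :
    trieWalk t (a :: s) = (match trieGet? t a with
      | none => false
      | some n => trieWalk n s) := rfl

theorem trieGet?_setEnd (t : Trie) (a : String) (h : a ≠ "__end__") :
    trieGet? (setEnd t) a = trieGet? t a := by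
  induction t with
  | nil => simp [setEnd, trieGet?, Ne.symm h]
  | cons k v rest ihv ihr =>
      by_cases hk : k = "__end__"
      · subst hk; simp [setEnd, trieGet?, Ne.symm h]
      · simp only [setEnd, if_neg hk, trieGet?]
        split
        · rfl
        · exact ihr

theorem trieWalk_nil (s : List String) : trieWalk Trie.nil s = s.isEmpty := by
  cases s <;> simp [trieWalk, trieGet?]

theorem trieWalk_insert (tr : List String) (t : Trie) (s : List String)
    (h : "__end__" ∉ s) :
    trieWalk (insertTrace t tr) s = (trieWalk t s || decide (s <+: tr)) := by
  induction tr generalizing t s with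
  | nil =>
      cases s with
      | nil => simp [trieWalk]
      | cons b s' =>
          have hb : b ≠ "__end__" := by intro e; exact h (e ▸ List.mem_cons_self ..)
          simp only [insertTrace, trieWalk_cons, trieGet?_setEnd t b hb]
          simp
  | cons a tr' ih =>
      induction t with
      | nil =>
          cases s with
          | nil => simp [trieWalk]
          | cons b s' =>
              have hs' : "__end__" ∉ s' := fun m => h (List.mem_cons_of_mem _ m)
              by_cases hab : a = b
              · subst hab
                simp [insertTrace, trieWalk_cons, trieGet?, ih _ _ hs',
                  trieWalk_nil, List.cons_prefix_cons]
                by_cases he : s' = []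
                · subst he; simp
                · simp [he]
              · have hnp : ¬ (b :: s' <+: a :: tr') := by
                  simp only [List.cons_prefix_cons]; intro e; exact hab e.1.symm
                simp [insertTrace, trieWalk_cons, trieGet?, hab, hnp]
      | cons k v rest ihv ihrest =>
          cases s with
          | nil => simp [trieWalk]
          | cons b s' =>
              have hs' : "__end__" ∉ s' := fun m => h (List.mem_cons_of_mem _ m)
              by_cases hka : k = a
              · subst hka
                by_cases hkb : k = b
                · subst hkb
                  simp [insertTrace, trieWalk_cons, trieGet?_cons_self,
                    ih _ _ hs', List.cons_prefix_cons]
                · have hnp : ¬ (b :: s' <+: k :: tr') := by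
                    simp only [List.cons_prefix_cons]; intro e; exact hkb e.1.symm
                  simp [insertTrace, trieWalk_cons, trieGet?_cons_ne _ _ _ _ hkb, hnp]
              · by_cases hkb : k = b
                · subst hkb
                  have hnp : ¬ (k :: s' <+: a :: tr') := by
                    simp only [List.cons_prefix_cons]; intro e; exact hka e.1
                  simp [insertTrace, hka, trieWalk_cons, trieGet?_cons_self, hnp]
                · have hrest := ihrest
                  simp only [trieWalk_cons] at hrest
                  simp only [insertTrace, if_neg hka, trieWalk_cons,
                    trieGet?_cons_ne _ _ _ _ hkb]
                  exact hrest

theorem trieWalk_foldl (trs : List (List String)) (t : Trie) (s : List String)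
    (h : "__end__" ∉ s) :
    trieWalk (trs.foldl insertTrace t) s
      = (trieWalk t s || trs.any (fun tr => decide (s <+: tr))) := by
  induction trs generalizing t with
  | nil => simp
  | cons tr trs' ih =>
      simp only [List.foldl_cons, List.any_cons]
      rw [ih, trieWalk_insert tr t s h]
      cases trieWalk t s <;> simp

theorem prefix_eq_take_beq (seq tr : List String) :
    decide (seq <+: tr) = (tr.take seq.length == seq) := by
  rw [Bool.eq_iff_iff]
  simp only [decide_eq_true_eq, beq_iff_eq, List.prefix_iff_eq_take]
  exact eq_comm

-- ===== VERDICT (by name: the statement is the Claim_ definition above) =====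
theorem pta_accepts_spec : Claim_equal_pta_accepts := by
  intro seq pos_traces _ hpre
  unfold Spec_pta_accepts pta_accepts pta_accepts_alt
  rw [trieWalk_foldl _ _ _ hpre.1, trieWalk_nil]
  simp only [prefix_eq_take_beq]
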